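-- pv_equiv track=rewrite | github.com/OZestina/TheGreatestGrace | codingTest/programmers/py/#221214_억억단.py | solution
-- ===== SOURCE A (Python) =====
-- def solution(e, starts):
--     divisor = {}
--
--     for i in range(1, e+1):
--         divisor[i] = 1
--
--     for i in range(2, e+1):
--         for n in range(i, e + 1, i):
--             divisor[n] += 1
--
--     answer = []
--     result = sorted(divisor, reverse=True, key=lambda x:divisor[x])
--
--     for s in starts:
--         for r in result:
--             if r >= s:
--                 answer.append(r)
--                 break
--
--     return answer
-- ===== SOURCE B (Python) =====
-- def solution(e, starts):
--     n = max(e, 0)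
--     d = [1] * (n + 1)
--     for i in range(2, n + 1):
--         for m in range(i, n + 1, i):
--             d[m] += 1
--     # best[i] = the number in [i, n] with the most divisors (smallest on ties);
--     # computed by a right-to-left suffix scan, 0 is a "nothing yet" sentinel.
--     best = [0] * (n + 2)
--     for i in range(n, 0, -1):
--         j = best[i + 1]
--         best[i] = i if j == 0 or d[i] >= d[j] else j
--     return [best[max(s, 1)] for s in starts if e >= 1 and s <= e]
-- ===== Notes on version B (the rewrite author's own statement) =====
-- stated objective: faster
-- what changed: Replaces the sort of all e numbers by divisor count plus a linear scan of that sorted list per query with a right-to-left suffix-best array giving each query's answer in O(1).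
import Mathlib
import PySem

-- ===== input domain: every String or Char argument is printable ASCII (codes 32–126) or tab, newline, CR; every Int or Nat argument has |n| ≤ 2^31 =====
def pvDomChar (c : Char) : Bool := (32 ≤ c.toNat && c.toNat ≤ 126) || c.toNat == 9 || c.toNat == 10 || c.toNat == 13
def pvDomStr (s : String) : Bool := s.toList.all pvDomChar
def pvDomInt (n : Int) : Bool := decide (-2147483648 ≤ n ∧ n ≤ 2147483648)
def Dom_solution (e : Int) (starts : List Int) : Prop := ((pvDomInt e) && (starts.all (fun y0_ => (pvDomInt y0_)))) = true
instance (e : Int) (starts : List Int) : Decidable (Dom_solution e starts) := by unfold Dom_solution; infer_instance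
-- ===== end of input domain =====

-- B replaces A's sort-by-divisor-count + per-query linear scan of the sorted list with a right-to-left suffix-best array answering each query in O(1).


-- Python sequence read/write at an index that is nonnegative and in range (true for every
-- access both programs make): exact there; an Int-valued table indexed 0..size-1.
def aget (a : Array Int) (i : Int) : Int := a.getD i.toNat 0
def aset (a : Array Int) (i : Int) (v : Int) : Array Int := a.setIfInBounds i.toNat v

-- ===== PORT A =====
-- 'for r in result: if r >= s: answer.append(r); break'
def scanAppendA (s : Int) (acc : List Int) : List Int → List Int
  | [] => acc
  | r :: rs => if s ≤ r then acc ++ [r] else scanAppendA s acc rs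

-- A's dict 'divisor': its keys are exactly 1..e in insertion order, so it is an Int-keyed
-- table; first loop writes 1 at keys 1..e, second loop is the sieve 'divisor[n] += 1'.
def divisorA (e : Int) : Array Int :=
  (PySem.List.pyRange 2 (e+1) 1).foldl (fun d i =>
      (PySem.List.pyRange i (e+1) i).foldl (fun d n => aset d n (aget d n + 1)) d)
    ((PySem.List.pyRange 1 (e+1) 1).foldl (fun d i => aset d i 1) (Array.replicate (e+1).toNat 0))

-- 'result = sorted(divisor, reverse=True, key=lambda x: divisor[x])': iterating the dict
-- yields its keys 1..e in insertion order; Python's sort is stable and reverse=True keeps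
-- equal-key elements in original order, i.e. exactly a stable mergeSort with this comparator.
def resultA (e : Int) : List Int :=
  let d := divisorA e
  (PySem.List.pyRange 1 (e+1) 1).mergeSort (fun x y => decide (aget d y ≤ aget d x))

def solution (e : Int) (starts : List Int) : List Int :=
  let result := resultA e
  starts.foldl (fun answer s => scanAppendA s answer result) []

-- ===== PORT B =====
-- Source B's list 'd' after the same sieve (n = max(e, 0))
def dAlt (e : Int) : Array Int :=
  (PySem.List.pyRange 2 (max e 0 + 1) 1).foldl (fun d i =>
      (PySem.List.pyRange i (max e 0 + 1) i).foldl (fun d m => aset d m (aget d m + 1)) d)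
    (Array.replicate (max e 0 + 1).toNat 1)

-- Source B's 'best' after the right-to-left suffix scan (0 = "nothing yet" sentinel)
def bestAlt (e : Int) : Array Int :=
  let d := dAlt e
  (PySem.List.pyRange (max e 0) 0 (-1)).foldl (fun best i =>
      aset best i
        (if aget best (i+1) = 0 ∨ aget d (aget best (i+1)) ≤ aget d i
         then i else aget best (i+1)))
    (Array.replicate (max e 0 + 2).toNat 0)

def solution_alt (e : Int) (starts : List Int) : List Int :=
  let best := bestAlt e
  starts.foldl (fun acc s =>
    if 1 ≤ e ∧ s ≤ e then acc ++ [aget best (max s 1)] else acc) []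

-- ===== PRECONDITION & SPEC =====
def Spec_solution (e : Int) (starts : List Int) (out : List Int) : Prop := out = solution_alt e starts
instance (e : Int) (starts : List Int) (out : List Int) : Decidable (Spec_solution e starts out) := by unfold Spec_solution; infer_instance

-- ===== CLAIM (what is proved, stated in full; the proofs are below) =====
def Claim_equal_solution : Prop := ∀ (e : Int) (starts : List Int), Dom_solution e starts → Spec_solution e starts (solution e starts)

-- ===== LEMMAS AND PROOFS =====

-- the strict "comes before" order realised by A's stable reverse sort on 1..e
def RB (key : Int → Int) (a b : Int) : Prop := key b < key a ∨ (key a = key b ∧ a < b)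

-- the key A sorts by
def fA (e : Int) : Int → Int := fun m => aget (divisorA e) m

-- the suffix-best recursion: gB key e k = element of [e-k, e] with the largest key (smallest on ties)
def gB (key : Int → Int) (e : Int) : Nat → Int
  | 0 => e
  | k+1 => if key (gB key e k) ≤ key (e - ((k:Int)+1)) then e - ((k:Int)+1) else gB key e k

theorem size_aset (a : Array Int) (i v : Int) : (aset a i v).size = a.size :=
  Array.size_setIfInBounds

theorem aget_aset (a : Array Int) (i m v : Int) (hi0 : 0 ≤ i) (hi : i < (a.size : Int))
    (hm0 : 0 ≤ m) (hm : m < (a.size : Int)) :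
    aget (aset a i v) m = if m = i then v else aget a m := by
  unfold aget aset
  have h1 : m.toNat < a.size := by omega
  have h2 : m.toNat < (a.setIfInBounds i.toNat v).size := by rw [Array.size_setIfInBounds]; omega
  rw [Array.getD_eq_getD_getElem?, Array.getD_eq_getD_getElem?, Array.getElem?_eq_getElem h2,
    Array.getElem?_eq_getElem h1, Array.getElem_setIfInBounds h1]
  split_ifs with h3 h4 h4 <;> simp <;> omega

theorem aget_replicate (n : Nat) (v m : Int) (h0 : 0 ≤ m) (h : m < (n:Int)) :
    aget (Array.replicate n v) m = v := by
  unfold aget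
  have h1 : m.toNat < (Array.replicate n v).size := by rw [Array.size_replicate]; omega
  rw [Array.getD_eq_getD_getElem?, Array.getElem?_eq_getElem h1, Array.getElem_replicate]
  rfl

theorem scanAppendA_eq_find? (s : Int) (acc l : List Int) :
    scanAppendA s acc l = acc ++ (l.find? (fun r => decide (s ≤ r))).toList := by
  induction l with
  | nil => simp [scanAppendA]
  | cons r rs ih => by_cases h : s ≤ r <;> simp [scanAppendA, List.find?, h, ih]

theorem find?_pairwise {R : Int → Int → Prop} (l : List Int) (p : Int → Bool)
    (hp : l.Pairwise R) {r0 x : Int}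
    (hf : l.find? p = some r0) (hx : x ∈ l) (hpx : p x = true) : r0 = x ∨ R r0 x := by
  induction l with
  | nil => simp at hx
  | cons a t ih =>
    rw [List.pairwise_cons] at hp
    by_cases ha : p a = true
    · rw [List.find?_cons_of_pos ha] at hf
      cases hf
      rcases List.mem_cons.mp hx with rfl | hx
      · exact Or.inl rfl
      · exact Or.inr (hp.1 x hx)
    · rw [List.find?_cons_of_neg ha] at hf
      rcases List.mem_cons.mp hx with rfl | hx
      · exact absurd hpx ha
      · exact ih hp.2 hf hx

theorem not_both_sublist {l : List Int} (hnd : l.Nodup) (a b : Int) (hab : a ≠ b)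
    (h1 : [a,b].Sublist l) (h2 : [b,a].Sublist l) : False := by
  induction l with
  | nil => simp at h1
  | cons h t ih =>
    rw [List.nodup_cons] at hnd
    rcases List.sublist_cons_iff.mp h1 with h1' | ⟨r1, hr1, hs1⟩
    · rcases List.sublist_cons_iff.mp h2 with h2' | ⟨r2, hr2, hs2⟩
      · exact ih hnd.2 h1' h2'
      · cases hr2
        exact hnd.1 (h1'.subset (by simp))
    · rcases List.sublist_cons_iff.mp h2 with h2' | ⟨r2, hr2, hs2⟩
      · cases hr1
        exact hnd.1 (h2'.subset (by simp))
      · cases hr1; cases hr2; exact hab rfl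

theorem pair_sublist_pyRange (u v e : Int) (h1 : 1 ≤ v) (h2 : v < u) (h3 : u < e + 1) :
    [v, u].Sublist (PySem.List.pyRange 1 (e+1) 1) := by
  rw [PySem.List.pyRange_one_append 1 u (e+1) (by omega) (by omega)]
  have hv : [v].Sublist (PySem.List.pyRange 1 u 1) :=
    List.singleton_sublist.mpr (PySem.List.mem_pyRange_one.mpr ⟨h1, h2⟩)
  have hu : [u].Sublist (PySem.List.pyRange u (e+1) 1) :=
    List.singleton_sublist.mpr (PySem.List.mem_pyRange_one.mpr ⟨le_refl _, h3⟩)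
  exact hv.append hu

theorem leA_trans (e : Int) : ∀ (a b c : Int),
    (fun x y => decide (aget (divisorA e) y ≤ aget (divisorA e) x)) a b = true →
    (fun x y => decide (aget (divisorA e) y ≤ aget (divisorA e) x)) b c = true →
    (fun x y => decide (aget (divisorA e) y ≤ aget (divisorA e) x)) a c = true := by
  intro a b c h1 h2
  simp only [decide_eq_true_eq] at *
  exact le_trans h2 h1

theorem leA_total (e : Int) : ∀ (a b : Int),
    ((fun x y => decide (aget (divisorA e) y ≤ aget (divisorA e) x)) a b ||
     (fun x y => decide (aget (divisorA e) y ≤ aget (divisorA e) x)) b a) = true := by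
  intro a b
  simp [le_total]

theorem mem_resultA (e x : Int) : x ∈ resultA e ↔ 1 ≤ x ∧ x < e + 1 := by
  simp only [resultA]
  rw [List.mem_mergeSort, PySem.List.mem_pyRange_one]

theorem resultA_nodup (e : Int) : (resultA e).Nodup :=
  ((List.mergeSort_perm _ _).nodup_iff).mpr (PySem.List.nodup_pyRange_one 1 (e+1))

theorem resultA_pairwise (e : Int) : (resultA e).Pairwise (RB (fA e)) := by
  rw [List.pairwise_iff_forall_sublist]
  intro u v huv
  have hle : aget (divisorA e) v ≤ aget (divisorA e) u := by
    have hp := List.pairwise_mergeSort (leA_trans e) (leA_total e) (PySem.List.pyRange 1 (e+1) 1)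
    have := (List.pairwise_iff_forall_sublist.mp hp) huv
    simpa using this
  have hne : u ≠ v := by
    have : ([u, v] : List Int).Nodup := (resultA_nodup e).sublist huv
    simpa using this
  have hu : u ∈ resultA e := huv.subset (by simp)
  have hv : v ∈ resultA e := huv.subset (by simp)
  rcases lt_or_eq_of_le hle with hlt | heq
  · exact Or.inl hlt
  · refine Or.inr ⟨heq.symm, ?_⟩
    by_contra huv'
    have hvu : v < u := by omega
    have hsub : [v, u].Sublist (PySem.List.pyRange 1 (e+1) 1) :=
      pair_sublist_pyRange u v e ((mem_resultA e v).mp hv).1 hvu ((mem_resultA e u).mp hu).2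
    have hstable : [v, u].Sublist (resultA e) := by
      simp only [resultA]
      refine List.sublist_mergeSort (leA_trans e) (leA_total e) ?_ hsub
      simp
      exact heq.ge
    exact not_both_sublist (resultA_nodup e) u v hne huv hstable

theorem gB_bounds (key : Int → Int) (e : Int) (k : Nat) : e - k ≤ gB key e k ∧ gB key e k ≤ e := by
  induction k with
  | zero => simp [gB]
  | succ k ih =>
    simp only [gB]
    split_ifs with h <;> omega

theorem gB_best (key : Int → Int) (e : Int) (k : Nat) :
    ∀ r : Int, e - k ≤ r → r ≤ e →
      key r < key (gB key e k) ∨ (key r = key (gB key e k) ∧ gB key e k ≤ r) := by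
  induction k with
  | zero =>
    intro r h1 h2
    have : r = e := by omega
    subst this
    exact Or.inr ⟨rfl, le_refl _⟩
  | succ k ih =>
    intro r h1 h2
    have hb := gB_bounds key e k
    simp only [gB]
    by_cases hre : r = e - ((k:Int)+1)
    · split_ifs with hc
      · exact Or.inr ⟨by rw [hre], by rw [hre]⟩
      · left
        rw [hre]
        linarith [lt_of_not_ge hc]
    · have hr : e - (k:Int) ≤ r := by omega
      rcases ih r hr h2 with h | ⟨h3, h4⟩
      · split_ifs with hc
        · exact Or.inl (lt_of_lt_of_le h hc)
        · exact Or.inl h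
      · split_ifs with hc
        · rcases lt_or_eq_of_le hc with h' | h'
          · exact Or.inl (by linarith)
          · exact Or.inr ⟨by linarith, by omega⟩
        · exact Or.inr ⟨h3, h4⟩

-- relation between A's table and B's table during the (identical) sieve
def RelAB (e : Int) (x y : Array Int) : Prop :=
  x.size = (e+1).toNat ∧ y.size = (e+1).toNat ∧
  ∀ m : Int, 1 ≤ m → m ≤ e → aget x m = aget y m

theorem relAB_step (e : Int) (x y : Array Int) (m : Int)
    (h : RelAB e x y) (h1 : 1 ≤ m) (h2 : m ≤ e) :
    RelAB e (aset x m (aget x m + 1)) (aset y m (aget y m + 1)) := by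
  obtain ⟨hx, hy, hv⟩ := h
  refine ⟨by rw [size_aset]; exact hx, by rw [size_aset]; exact hy, ?_⟩
  intro m' hm1 hm2
  rw [aget_aset _ _ _ _ (by omega) (by omega) (by omega) (by omega),
    aget_aset _ _ _ _ (by omega) (by omega) (by omega) (by omega)]
  split_ifs with hmm
  · rw [hv m h1 h2]
  · exact hv m' hm1 hm2

theorem relAB_inner (e : Int) (ms : List Int) :
    ∀ (x y : Array Int), RelAB e x y → (∀ m ∈ ms, 1 ≤ m ∧ m ≤ e) →
    RelAB e (ms.foldl (fun d n => aset d n (aget d n + 1)) x)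
      (ms.foldl (fun d m => aset d m (aget d m + 1)) y) := by
  induction ms with
  | nil => intro x y h _; exact h
  | cons m ms ih =>
    intro x y h hb
    simp only [List.foldl_cons]
    exact ih _ _ (relAB_step e x y m h (hb m (by simp)).1 (hb m (by simp)).2)
      (fun n hn => hb n (by simp [hn]))

theorem relAB_outer (e : Int) (os : List Int) :
    ∀ (x y : Array Int), RelAB e x y → (∀ i ∈ os, 0 < i) →
    RelAB e
      (os.foldl (fun d i => (PySem.List.pyRange i (e+1) i).foldl
          (fun d n => aset d n (aget d n + 1)) d) x)
      (os.foldl (fun d i => (PySem.List.pyRange i (e+1) i).foldl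
          (fun d m => aset d m (aget d m + 1)) d) y) := by
  induction os with
  | nil => intro x y h _; exact h
  | cons i os ih =>
    intro x y h hb
    simp only [List.foldl_cons]
    refine ih _ _ ?_ (fun n hn => hb n (by simp [hn]))
    refine relAB_inner e _ x y h ?_
    intro m hm
    have hi : 0 < i := hb i (by simp)
    have := (PySem.List.mem_pyRange_iff_of_pos hi m).mp hm
    omega

theorem aget_fold_ones (ms : List Int) :
    ∀ a : Array Int, (∀ n ∈ ms, 0 ≤ n ∧ n < (a.size : Int)) →
    ∀ m : Int, 0 ≤ m → m < (a.size : Int) →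
    aget (ms.foldl (fun d i => aset d i 1) a) m = if m ∈ ms then 1 else aget a m := by
  induction ms with
  | nil => intro a _ m _ _; simp
  | cons n ms ih =>
    intro a hb m hm0 hm
    simp only [List.foldl_cons]
    have hn := hb n (by simp)
    have hsz : (((aset a n 1).size : Nat) : Int) = (a.size : Int) := by rw [size_aset]
    rw [ih _ (fun k hk => by rw [hsz]; exact hb k (by simp [hk])) m hm0 (by rw [hsz]; exact hm)]
    rw [aget_aset _ _ _ _ hn.1 hn.2 hm0 hm]
    by_cases h1 : m ∈ ms <;> by_cases h2 : m = n <;> simp [h1, h2]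

theorem relAB_final (e : Int) (he : 1 ≤ e) : RelAB e (divisorA e) (dAlt e) := by
  have hmax : max e 0 = e := by omega
  unfold divisorA dAlt
  rw [hmax]
  have hinit : RelAB e
      ((PySem.List.pyRange 1 (e+1) 1).foldl (fun d i => aset d i 1) (Array.replicate (e+1).toNat 0))
      (Array.replicate (e+1).toNat 1) := by
    refine ⟨?_, by simp, ?_⟩
    · have : ∀ (ms : List Int) (a : Array Int),
          (ms.foldl (fun d i => aset d i 1) a).size = a.size := by
        intro ms
        induction ms with
        | nil => intro a; rfl
        | cons n ms ih => intro a; simp only [List.foldl_cons]; rw [ih, size_aset]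
      rw [this]
      simp
    · intro m h1 h2
      rw [aget_fold_ones _ _ (fun n hn => by
            have := PySem.List.mem_pyRange_one.mp hn
            simp only [Array.size_replicate]; omega) m (by omega)
          (by (try simp only [Array.size_replicate]); omega)]
      rw [if_pos (PySem.List.mem_pyRange_one.mpr ⟨h1, by omega⟩)]
      rw [aget_replicate _ _ _ (by omega) (by omega)]
  refine relAB_outer e _ _ _ hinit ?_
  intro i hi
  have := PySem.List.mem_pyRange_one.mp hi
  omega

-- one step of B's right-to-left scan
def stepB (e : Int) (best : Array Int) (i : Int) : Array Int :=
  aset best i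
    (if aget best (i+1) = 0 ∨ aget (dAlt e) (aget best (i+1)) ≤ aget (dAlt e) i
     then i else aget best (i+1))

-- B's scan, folded from the right starting at index i
def FB (e i : Int) : Array Int :=
  (PySem.List.pyRange i (e+1) 1).foldr (fun i b => stepB e b i) (Array.replicate (e+2).toNat 0)

theorem bestAlt_eq_FB (e : Int) (he : 1 ≤ e) : bestAlt e = FB e 1 := by
  have hmax : max e 0 = e := by omega
  simp only [bestAlt, FB, stepB]
  rw [hmax]
  have : PySem.List.pyRange e 0 (-1) = (PySem.List.pyRange 1 (e+1) 1).reverse := by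
    simpa using PySem.List.pyRange_neg_one_eq_reverse e 0
  rw [this, List.foldl_reverse]

def QB (e i : Int) (b : Array Int) : Prop :=
  b.size = (e+2).toNat ∧
  (∀ m : Int, i ≤ m → m ≤ e → aget b m = gB (fA e) e (e-m).toNat) ∧
  (∀ m : Int, 0 ≤ m → m < i → aget b m = 0) ∧
  aget b (e+1) = 0

theorem QB_FB (e : Int) (he : 1 ≤ e) :
    ∀ (k : Nat) (i : Int), 1 ≤ i → i ≤ e+1 → e+1-i = k → QB e i (FB e i) := by
  have hrel := relAB_final e he
  intro k
  induction k with
  | zero =>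
    intro i _ _ hk
    have : i = e + 1 := by omega
    subst this
    unfold FB
    rw [PySem.List.pyRange_one_eq_nil (by omega)]
    refine ⟨by simp, ?_, ?_, ?_⟩
    · intro m h1 h2; omega
    · intro m h1 h2
      rw [List.foldr_nil, aget_replicate _ _ _ h1 (by omega)]
    · rw [List.foldr_nil, aget_replicate _ _ _ (by omega) (by omega)]
  | succ k ih =>
    intro i hi1 hi2 hk
    have hie : i ≤ e := by omega
    have hFB : FB e i = stepB e (FB e (i+1)) i := by
      unfold FB
      rw [PySem.List.pyRange_one_cons (by omega : i < e+1)]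
      rfl
    obtain ⟨hlen, hin, hout, hsent⟩ := ih (i+1) (by omega) (by omega) (by omega)
    have hilen : (i : Int) < ((FB e (i+1)).size : Int) := by rw [hlen]; omega
    rcases eq_or_lt_of_le hie with hie' | hlt
    · -- i = e: sentinel branch, best[i] := i
      have hj : aget (FB e (i+1)) (i+1) = 0 := by
        have := hsent; rw [show e + 1 = i + 1 by omega] at this; exact this
      rw [hFB]
      unfold stepB
      rw [hj]
      rw [if_pos (Or.inl rfl)]
      refine ⟨by rw [size_aset]; exact hlen, ?_, ?_, ?_⟩
      · intro m h1 h2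
        have hmi : m = i := by omega
        subst hmi
        rw [aget_aset _ _ _ _ (by omega) hilen (by omega) hilen, if_pos rfl]
        have : (e - m).toNat = 0 := by omega
        rw [this]
        simp [gB, hie']
      · intro m h1 h2
        rw [aget_aset _ _ _ _ (by omega) hilen h1 (by rw [hlen]; omega),
          if_neg (by omega)]
        exact hout m h1 (by omega)
      · rw [aget_aset _ _ _ _ (by omega) hilen (by omega) (by rw [hlen]; omega),
          if_neg (by omega)]
        exact hsent
    · -- i < e: best[i+1] is the suffix best of [i+1, e]
      have hj : aget (FB e (i+1)) (i+1) = gB (fA e) e (e-(i+1)).toNat :=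
        hin (i+1) (le_refl _) (by omega)
      have hbj := gB_bounds (fA e) e (e-(i+1)).toNat
      have hcast : ((e-(i+1)).toNat : Int) = e - i - 1 := by omega
      have hj1 : i + 1 ≤ gB (fA e) e (e-(i+1)).toNat := by omega
      have hj2 : gB (fA e) e (e-(i+1)).toNat ≤ e := hbj.2
      have hda : ∀ m : Int, 1 ≤ m → m ≤ e → aget (dAlt e) m = fA e m := by
        intro m h1 h2
        exact (hrel.2.2 m h1 h2).symm
      rw [hFB]
      unfold stepB
      rw [hj, hda _ (by omega) hj2, hda i (by omega) hie]
      have hcond : (gB (fA e) e (e-(i+1)).toNat = 0 ∨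
          fA e (gB (fA e) e (e-(i+1)).toNat) ≤ fA e i) ↔
          (fA e (gB (fA e) e (e-(i+1)).toNat) ≤ fA e i) := by
        constructor
        · rintro (h | h)
          · omega
          · exact h
        · exact Or.inr
      have hval : (if gB (fA e) e (e-(i+1)).toNat = 0 ∨
            fA e (gB (fA e) e (e-(i+1)).toNat) ≤ fA e i then i
          else gB (fA e) e (e-(i+1)).toNat) = gB (fA e) e (e-i).toNat := by
        have hsucc : (e - i).toNat = (e-(i+1)).toNat + 1 := by omega
        rw [hsucc]
        simp only [gB]
        have : e - (((e-(i+1)).toNat : Int) + 1) = i := by omega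
        rw [this]
        split_ifs with h1 h2 h2
        · rfl
        · exact absurd (hcond.mp h1) h2
        · exact absurd (Or.inr h2) h1
        · rfl
      rw [hval]
      refine ⟨by rw [size_aset]; exact hlen, ?_, ?_, ?_⟩
      · intro m h1 h2
        rcases eq_or_lt_of_le h1 with h1' | h1'
        · rw [← h1']
          rw [aget_aset _ _ _ _ (by omega) hilen (by omega) hilen, if_pos rfl]
        · rw [aget_aset _ _ _ _ (by omega) hilen (by omega) (by rw [hlen]; omega),
            if_neg (by omega)]
          exact hin m (by omega) h2
      · intro m h1 h2
        rw [aget_aset _ _ _ _ (by omega) hilen h1 (by rw [hlen]; omega),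
          if_neg (by omega)]
        exact hout m h1 (by omega)
      · rw [aget_aset _ _ _ _ (by omega) hilen (by omega) (by rw [hlen]; omega),
          if_neg (by omega)]
        exact hsent

theorem bestAlt_lookup (e s : Int) (he : 1 ≤ e) (hs : s ≤ e) :
    aget (bestAlt e) (max s 1) = gB (fA e) e (e - max s 1).toNat := by
  rw [bestAlt_eq_FB e he]
  exact (QB_FB e he e.toNat 1 (le_refl _) (by omega) (by omega)).2.1 (max s 1) (by omega) (by omega)

theorem findA (e s : Int) (he : 1 ≤ e) (hs : s ≤ e) :
    (resultA e).find? (fun r => decide (s ≤ r)) = some (gB (fA e) e (e - max s 1).toNat) := by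
  have hmb := gB_bounds (fA e) e (e - max s 1).toNat
  have hm1 : max s 1 ≤ gB (fA e) e (e - max s 1).toNat := by omega
  have hmem : gB (fA e) e (e - max s 1).toNat ∈ resultA e :=
    (mem_resultA e _).mpr ⟨by omega, by omega⟩
  have hsome : ((resultA e).find? (fun r => decide (s ≤ r))).isSome :=
    List.find?_isSome.mpr ⟨_, hmem, by simp; omega⟩
  obtain ⟨r0, hr0⟩ := Option.isSome_iff_exists.mp hsome
  have hp0 : s ≤ r0 := by simpa using List.find?_some hr0
  have hr0b := (mem_resultA e r0).mp (List.mem_of_find?_eq_some hr0)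
  have hbest := gB_best (fA e) e (e - max s 1).toNat r0 (by omega) (by omega)
  rcases find?_pairwise _ _ (resultA_pairwise e) hr0 hmem (by simp; omega) with h | h
  · rw [hr0, h]
  · exfalso
    rcases h with h | ⟨h1, h2⟩ <;> rcases hbest with h' | ⟨h1', h2'⟩ <;>
      [linarith; linarith; linarith; omega]

theorem step_eq (e : Int) (he : 1 ≤ e) (acc : List Int) (s : Int) :
    scanAppendA s acc (resultA e) =
      if 1 ≤ e ∧ s ≤ e then acc ++ [aget (bestAlt e) (max s 1)] else acc := by
  rw [scanAppendA_eq_find?]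
  by_cases hs : s ≤ e
  · rw [findA e s he hs, if_pos ⟨he, hs⟩, bestAlt_lookup e s he hs]
    rfl
  · rw [if_neg (by tauto)]
    have hnone : (resultA e).find? (fun r => decide (s ≤ r)) = none := by
      rw [List.find?_eq_none]
      intro x hx
      have := (mem_resultA e x).mp hx
      simp
      omega
    rw [hnone]
    simp

theorem resultA_nonpos (e : Int) (he : e ≤ 0) : resultA e = [] := by
  simp only [resultA]
  rw [PySem.List.pyRange_one_eq_nil (by omega)]
  exact List.mergeSort_nil

theorem main_nonpos (e : Int) (starts : List Int) (he : e ≤ 0) :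
    solution e starts = solution_alt e starts := by
  have h1 : solution e starts = [] := by
    simp only [solution]
    rw [PySem.List.foldl_congr_mem _ _ (fun acc _ => acc) _
      (by intro acc s _; rw [resultA_nonpos e he]; rfl)]
    exact PySem.List.foldl_ignore _ _
  have h2 : solution_alt e starts = [] := by
    simp only [solution_alt]
    rw [PySem.List.foldl_congr_mem _ _ (fun acc _ => acc) _
      (by intro acc s _; exact if_neg (by omega))]
    exact PySem.List.foldl_ignore _ _
  rw [h1, h2]

theorem main_pos (e : Int) (starts : List Int) (he : 1 ≤ e) :
    solution e starts = solution_alt e starts := by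
  simp only [solution, solution_alt]
  exact PySem.List.foldl_congr_mem _ _ _ _ (fun acc s _ => step_eq e he acc s)

-- ===== VERDICT (by name: the statement is the Claim_ definition above) =====
theorem solution_spec : Claim_equal_solution := by
  intro e starts _
  unfold Spec_solution
  by_cases he : 1 ≤ e
  · exact main_pos e starts he
  · exact main_nonpos e starts (by omega)
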